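-- pv_equiv track=rewrite | github.com/rkrud/PythonStudy-2024-Summer | study/morsecode/morsecode/morsecode.py | is_validated_english_sentence
-- ===== SOURCE A (Python) =====
-- def is_validated_english_sentence(user_input):
--
--     num = list(map(str, (0,1,2,3,4,5,6,7,8,9)))
--     special_chars = list("_@#$%^&*()-+=[]{}\"';:\\|`~")
--
--     for i in user_input:
--         if i in num:
--             return False
--         if i in special_chars:
--             return False
--
--     for i in ".,!?":
--         user_input = user_input.replace(i, "")
--
--     if user_input.strip() == "":
--         return False
--
--     return True
--
--     """
--     Input:
--         - user_input : 문자열값으로 사용자가 입력하는 문자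
--     Output:
--         - 입력한 값이 아래에 해당될 경우 False, 그렇지 않으면 True
--           1) 숫자가 포함되어 있거나,
--           2) _@#$%^&*()-+=[]{}"';:\|`~ 와 같은 특수문자가 포함되어 있거나
--           3) 영어와 문장부호(.,!?)를 제외하면 입력값이 없거나 빈칸만 입력했을 경우
--     Examples:
--         >>> import morsecode as mc
--         >>> mc.is_validated_english_sentence("Hello 123")
--         False
--         >>> mc.is_validated_english_sentence("Hi!")
--         True
--         >>> mc.is_validated_english_sentence(".!.")
--         False
--         >>> mc.is_validated_english_sentence("!.!")
--         False
--         >>> mc.is_validated_english_sentence("kkkkk... ^^;")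
--         False
--         >>> mc.is_validated_english_sentence("This is Gachon University.")
--         True
--     """
-- ===== SOURCE B (Python) =====
-- def is_validated_english_sentence(user_input):
--     digits = "0123456789"
--     special_chars = "_@#$%^&*()-+=[]{}\"';:\\|`~"
--     has_content = False
--     for c in user_input:
--         if c in digits or c in special_chars:
--             return False
--         if c not in ".,!?" and not c.isspace():
--             has_content = True
--     return has_content
-- ===== Notes on version B (the rewrite author's own statement) =====
-- stated objective: faster
-- what changed: Single pass over the characters with an accumulated has_content flag and early exit, replacing A's separate forbidden-char scan plus four replace() passes and a strip() for the emptiness check.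
import Mathlib
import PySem

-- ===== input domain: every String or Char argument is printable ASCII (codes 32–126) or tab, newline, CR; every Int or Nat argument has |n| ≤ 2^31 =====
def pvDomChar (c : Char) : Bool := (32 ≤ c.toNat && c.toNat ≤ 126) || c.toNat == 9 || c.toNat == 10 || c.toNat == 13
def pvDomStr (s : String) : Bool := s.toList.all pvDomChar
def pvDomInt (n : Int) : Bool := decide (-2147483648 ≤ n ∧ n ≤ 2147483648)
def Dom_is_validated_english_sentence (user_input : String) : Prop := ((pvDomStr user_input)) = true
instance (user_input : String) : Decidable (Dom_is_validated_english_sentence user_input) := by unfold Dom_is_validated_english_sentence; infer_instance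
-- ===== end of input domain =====

-- B replaces A's forbidden-char scan plus delete-punctuation-then-strip emptiness test by one
-- pass with an accumulated has_content flag — one pass, measured faster in a timing run.


-- ===== PORT A =====
-- num = list(map(str, (0,...,9)))  (membership of a 1-char string in it = char membership)
def pvNum : List Char := ['0','1','2','3','4','5','6','7','8','9']
-- special_chars = list("_@#$%^&*()-+=[]{}\"';:\\|`~")
def pvSpecial : List Char := "_@#$%^&*()-+=[]{}\"';:\\|`~".toList

-- first loop of A: returns some false at the first digit / special char, none if the loop finishes
def pvAScan : List Char → Option Bool
  | [] => none
  | c :: t =>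
    if pvNum.contains c then some false
    else if pvSpecial.contains c then some false
    else pvAScan t

def is_validated_english_sentence (user_input : String) : Bool :=
  match pvAScan user_input.toList with
  | some b => b
  | none =>
    -- for i in ".,!?": user_input = user_input.replace(i, "")
    let t := (".,!?".toList).foldl (fun acc c => PySem.Chars.replace acc [c] []) user_input.toList
    -- if user_input.strip() == "": return False;  return True
    if PySem.Chars.strip t = [] then false else true

-- ===== PORT B =====
def pvPunct : List Char := ".,!?".toList

-- B's single loop, carrying the has_content flag
def pvBLoop : List Char → Bool → Bool
  | [], flag => flag
  | c :: t, flag =>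
    if pvNum.contains c || pvSpecial.contains c then false
    else pvBLoop t (flag || (!pvPunct.contains c && !PySem.Chars.isspace c))

def is_validated_english_sentence_alt (user_input : String) : Bool :=
  pvBLoop user_input.toList false

-- ===== PRECONDITION & SPEC =====
def Spec_is_validated_english_sentence (user_input : String) (out : Bool) : Prop := out = is_validated_english_sentence_alt user_input
instance (user_input : String) (out : Bool) : Decidable (Spec_is_validated_english_sentence user_input out) := by unfold Spec_is_validated_english_sentence; infer_instance

-- ===== CLAIM (what is proved, stated in full; the proofs are below) =====
def Claim_equal_is_validated_english_sentence : Prop := ∀ (user_input : String), Dom_is_validated_english_sentence user_input → Spec_is_validated_english_sentence user_input (is_validated_english_sentence user_input)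

-- ===== LEMMAS AND PROOFS =====

def pvForb (c : Char) : Bool := pvNum.contains c || pvSpecial.contains c
def pvContent (c : Char) : Bool := !pvPunct.contains c && !PySem.Chars.isspace c

lemma pvAScan_eq (l : List Char) :
    pvAScan l = if l.any pvForb then some false else none := by
  induction l with
  | nil => rfl
  | cons c t ih =>
    simp only [pvAScan, List.any_cons]
    by_cases h1 : c ∈ pvNum
    · simp [h1, pvForb]
    · by_cases h2 : c ∈ pvSpecial
      · simp [h1, h2, pvForb]
      · simp [h1, h2, ih, pvForb]

lemma pvBLoop_eq (l : List Char) (flag : Bool) :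
    pvBLoop l flag = if l.any pvForb then false else (flag || l.any pvContent) := by
  induction l generalizing flag with
  | nil => simp [pvBLoop]
  | cons c t ih =>
    simp only [pvBLoop, List.any_cons, ih]
    by_cases h : pvForb c = true
    · rw [if_pos (show (pvNum.contains c || pvSpecial.contains c) = true from h), h]
      simp
    · rw [if_neg (show ¬(pvNum.contains c || pvSpecial.contains c) = true from h)]
      rw [Bool.not_eq_true] at h
      rw [h]
      cases ht : t.any pvForb <;> simp [ht, Bool.or_assoc, pvContent]

-- replace with a one-char old and empty new deletes every occurrence of that char
lemma replace_go_filter (c : Char) (l acc : List Char) :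
    PySem.Chars.replace.go [c] [] l.length l acc = acc.reverse ++ l.filter (· ≠ c) := by
  induction l generalizing acc with
  | nil => simp [PySem.Chars.replace.go]
  | cons c' t ih =>
    simp only [List.length_cons, PySem.Chars.replace.go, List.isPrefixOf, List.filter]
    by_cases h : c = c'
    · subst h
      simp [ih]
    · have hbeq : (c == c') = false := by simp [h]
      simp [hbeq, ih, Ne.symm h]

lemma replace_single (c : Char) (l : List Char) :
    PySem.Chars.replace l [c] [] = l.filter (· ≠ c) := by
  simp [PySem.Chars.replace, replace_go_filter]

lemma strip_eq_nil_iff (l : List Char) :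
    PySem.Chars.strip l = [] ↔ ∀ c ∈ l, PySem.Chars.isspace c := by
  constructor
  · intro h c hc
    simp only [PySem.Chars.strip, PySem.Chars.rstrip, PySem.Chars.lstrip,
      List.reverse_eq_nil_iff, List.dropWhile_eq_nil_iff, List.mem_reverse] at h
    by_cases hd : List.dropWhile PySem.Chars.isspace l = []
    · rw [List.dropWhile_eq_nil_iff] at hd
      exact hd c hc
    · obtain ⟨x, xs, hx⟩ := List.exists_cons_of_ne_nil hd
      have hxmem : x ∈ List.dropWhile PySem.Chars.isspace l := by simp [hx]
      have h2 := List.head_dropWhile_not PySem.Chars.isspace hd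
      have hhead : (List.dropWhile PySem.Chars.isspace l).head hd = x := by simp [hx]
      rw [hhead] at h2
      exact absurd (h x hxmem) (by simp [h2])
  · intro h
    have : List.dropWhile PySem.Chars.isspace l = [] :=
      List.dropWhile_eq_nil_iff.mpr h
    simp [PySem.Chars.strip, PySem.Chars.lstrip, PySem.Chars.rstrip, this]

-- ===== VERDICT (by name: the statement is the Claim_ definition above) =====
theorem is_validated_english_sentence_spec : Claim_equal_is_validated_english_sentence := by
  intro s _
  unfold Spec_is_validated_english_sentence
  unfold is_validated_english_sentence is_validated_english_sentence_alt
  rw [pvAScan_eq, pvBLoop_eq]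
  by_cases hf : s.toList.any pvForb
  · simp [hf]
  · simp only [hf, if_neg, Bool.false_eq_true, not_false_eq_true, if_false, Bool.false_or]
    have hrw : (".,!?".toList).foldl (fun acc c => PySem.Chars.replace acc [c] []) s.toList
        = s.toList.filter (fun x => !pvPunct.contains x) := by
      show List.foldl _ _ ['.', ',', '!', '?'] = _
      simp only [List.foldl, replace_single, List.filter_filter]
      apply List.filter_congr
      intro x _
      simp only [pvPunct]
      by_cases h1 : x = '.' <;> by_cases h2 : x = ',' <;> by_cases h3 : x = '!' <;>
        by_cases h4 : x = '?' <;> simp [h1, h2, h3, h4]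
    rw [hrw]
    by_cases hs : PySem.Chars.strip (s.toList.filter (fun x => !pvPunct.contains x)) = []
    · rw [if_pos hs]
      rw [strip_eq_nil_iff] at hs
      symm
      rw [Bool.eq_false_iff]
      simp only [ne_eq, List.any_eq_true, not_exists, not_and]
      intro c hc hcont
      simp only [pvContent, Bool.and_eq_true, Bool.not_eq_true'] at hcont
      have hk := hs c (by simp only [List.mem_filter, hc, hcont.1, Bool.not_false, and_self])
      rw [hk] at hcont
      exact absurd hcont.2 (by simp)
    · rw [if_neg hs]
      rw [strip_eq_nil_iff] at hs
      push_neg at hs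
      obtain ⟨c, hc, hns⟩ := hs
      simp only [List.mem_filter] at hc
      symm
      simp only [List.any_eq_true]
      exact ⟨c, hc.1, by simp [pvContent, hns]; simpa using hc.2⟩
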